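-- pv_equiv track=rewrite | github.com/MrBrantCode/unitest_baseline | mut_generate/mist_train_taco/taco_8127/solution.py | calculate_error_function
-- ===== SOURCE A (Python) =====
-- from bisect import bisect_left
--
-- def calculate_error_function(user_address, potential_addresses):
--     # Initialize a dictionary to store positions of each character in the user_address
--     char_positions = {chr(i): [] for i in range(ord('a'), ord('z') + 1)}
--
--     # Populate the dictionary with positions of each character in the user_address
--     for index, char in enumerate(user_address):
--         char_positions[char].append(index)
--
--     # Function to generate midpoints for binary search optimization
--     def generate_midpoints(positions):
--         return [(positions[i] + positions[i - 1]) // 2 for i in range(1, len(positions))]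
--
--     # Generate midpoints for each character
--     midpoints = {char: generate_midpoints(positions) for char, positions in char_positions.items()}
--
--     # Function to calculate the error for a single potential address
--     def calculate_error(potential_address):
--         error_sum = 0
--         for index, char in enumerate(potential_address):
--             if char_positions[char]:
--                 if midpoints[char]:
--                     closest_index = bisect_left(midpoints[char], index)
--                     error_sum += abs(index - char_positions[char][closest_index])
--                 else:
--                     error_sum += abs(index - char_positions[char][0])
--             else:
--                 error_sum += len(potential_address)
--         return error_sum
--
--     # Calculate the error for each potential address and store the results
--     errors = [calculate_error(address) for address in potential_addresses]
--
--     return errors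
-- ===== SOURCE B (Python) =====
-- def calculate_error_function(user_address, potential_addresses):
--     # Same a-z dictionary and populating loop as the original (KeyError behaviour preserved)
--     char_positions = {chr(i): [] for i in range(ord('a'), ord('z') + 1)}
--     for index, char in enumerate(user_address):
--         char_positions[char].append(index)
--     errors = []
--     for potential_address in potential_addresses:
--         error_sum = 0
--         for index, char in enumerate(potential_address):
--             positions = char_positions[char]
--             if positions:
--                 error_sum += min(abs(index - p) for p in positions)
--             else:
--                 error_sum += len(potential_address)
--         errors.append(error_sum)
--     return errors
-- ===== Notes on version B (the rewrite author's own statement) =====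
-- stated objective: simpler
-- what changed: Drops the per-character midpoint precomputation and the bisect binary search, computing each character's nearest-occurrence distance by a direct min over its position list; the a-z dictionary and populating loop are kept so the KeyError domain is unchanged.
import Mathlib
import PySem

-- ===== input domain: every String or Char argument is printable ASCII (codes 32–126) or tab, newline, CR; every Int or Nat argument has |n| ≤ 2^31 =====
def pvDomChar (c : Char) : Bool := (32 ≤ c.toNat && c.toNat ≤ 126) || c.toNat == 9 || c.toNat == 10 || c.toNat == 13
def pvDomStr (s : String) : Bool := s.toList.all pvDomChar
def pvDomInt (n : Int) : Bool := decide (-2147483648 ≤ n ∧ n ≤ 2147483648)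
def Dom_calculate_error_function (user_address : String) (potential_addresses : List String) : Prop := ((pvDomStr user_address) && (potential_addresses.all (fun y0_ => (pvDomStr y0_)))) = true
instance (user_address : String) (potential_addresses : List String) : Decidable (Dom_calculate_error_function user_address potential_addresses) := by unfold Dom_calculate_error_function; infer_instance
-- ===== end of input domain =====

-- B drops A's midpoint precomputation and bisect binary search, taking a direct min
-- over each character's position list instead (objective: simpler).

-- ===== PORT A =====
-- {chr(i): [] for i in range(ord('a'), ord('z') + 1)}
def initCharDict : PySem.Dict Char (List Int) :=
  (PySem.List.pyRange 97 123 1).foldl (fun d i => d.insert (Char.ofNat i.toNat) []) PySem.Dict.empty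

-- for index, char in enumerate(user_address): char_positions[char].append(index)
-- (this loop is verbatim in both Pythons, so A and B share this helper)
def buildCharPositions (user_address : String) : PySem.Dict Char (List Int) :=
  (user_address.toList.zipIdx.map (fun p => (p.1, (p.2 : Int)))).foldl
    (fun d p => d.modify p.1 [] (fun l => l ++ [p.2])) initCharDict

-- def generate_midpoints(positions): [(positions[i] + positions[i-1]) // 2 for i in range(1, len(positions))]
def genMidpoints (positions : List Int) : List Int :=
  (PySem.List.pyRange 1 (positions.length : Int) 1).map
    (fun i => PySem.Int.floordiv (PySem.List.pyGetD positions i 0 + PySem.List.pyGetD positions (i - 1) 0) 2)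

-- midpoints = {char: generate_midpoints(positions) for char, positions in char_positions.items()}
def midDict (char_positions : PySem.Dict Char (List Int)) : PySem.Dict Char (List Int) :=
  char_positions.items.foldl (fun d p => d.insert p.1 (genMidpoints p.2)) PySem.Dict.empty

-- def calculate_error(potential_address): A's inner function
def calcError (char_positions midpoints : PySem.Dict Char (List Int)) (potential_address : String) : Int :=
  potential_address.toList.zipIdx.foldl (fun error_sum p =>
    let index : Int := (p.2 : Int)
    let ps := char_positions.getD p.1 []
    if ps ≠ [] then
      let ms := midpoints.getD p.1 []
      if ms ≠ [] then
        let closest_index := PySem.List.bisectLeft ms index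
        error_sum + |index - PySem.List.pyGetD ps (closest_index : Int) 0|
      else
        error_sum + |index - PySem.List.pyGetD ps 0 0|
    else
      error_sum + PySem.Str.len potential_address) 0

def calculate_error_function (user_address : String) (potential_addresses : List String) : List Int :=
  potential_addresses.map
    (calcError (buildCharPositions user_address) (midDict (buildCharPositions user_address)))

-- ===== PORT B =====
-- B's inner loop: error_sum += min(abs(index - p) for p in positions) as a running-min scan
def calcErrorAlt (char_positions : PySem.Dict Char (List Int)) (potential_address : String) : Int :=
  potential_address.toList.zipIdx.foldl (fun error_sum p =>
    let index : Int := (p.2 : Int)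
    match char_positions.getD p.1 [] with
    | [] => error_sum + PySem.Str.len potential_address
    | q :: rest => error_sum + rest.foldl (fun m r => min m |index - r|) |index - q|) 0

def calculate_error_function_alt (user_address : String) (potential_addresses : List String) : List Int :=
  potential_addresses.map (calcErrorAlt (buildCharPositions user_address))

-- ===== PRECONDITION & SPEC =====
-- Pre_ excludes exactly the inputs on which the Python A raises KeyError: any character
-- outside 'a'..'z' (in user_address or a potential address) is missing from the a-z dict.
def Pre_calculate_error_function (user_address : String) (potential_addresses : List String) : Prop :=
  (user_address.toList.all (fun c => decide ('a' ≤ c) && decide (c ≤ 'z')) = true) ∧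
  (potential_addresses.all (fun s => s.toList.all (fun c => decide ('a' ≤ c) && decide (c ≤ 'z'))) = true)
instance (user_address : String) (potential_addresses : List String) : Decidable (Pre_calculate_error_function user_address potential_addresses) := by unfold Pre_calculate_error_function; infer_instance

def pvWitness_calculate_error_function : String × List String := ("abcab", ["ab", "zzc", ""])

def Spec_calculate_error_function (user_address : String) (potential_addresses : List String) (out : List Int) : Prop := out = calculate_error_function_alt user_address potential_addresses
instance (user_address : String) (potential_addresses : List String) (out : List Int) : Decidable (Spec_calculate_error_function user_address potential_addresses out) := by unfold Spec_calculate_error_function; infer_instance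

-- ===== CLAIM (what is proved, stated in full; the proofs are below) =====
def Claim_equal_calculate_error_function : Prop := ∀ (user_address : String) (potential_addresses : List String), Dom_calculate_error_function user_address potential_addresses → Pre_calculate_error_function user_address potential_addresses → Spec_calculate_error_function user_address potential_addresses (calculate_error_function user_address potential_addresses)

-- ===== LEMMAS AND PROOFS =====

-- the position list a character ends up with: its indices in user_address, in order
def posOf (user_address : String) (c : Char) : List Int :=
  ((user_address.toList.zipIdx.map (fun p => (p.1, (p.2 : Int)))).filter
    (fun p => p.1 == c)).map (·.2)

lemma foldl_insert_nil_getD (l : List Int) (d : PySem.Dict Char (List Int))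
    (h : ∀ c, d.getD c [] = []) :
    ∀ c, (l.foldl (fun d i => d.insert (Char.ofNat i.toNat) ([] : List Int)) d).getD c [] = [] := by
  induction l generalizing d with
  | nil => exact h
  | cons x t ih =>
      intro c
      simp only [List.foldl_cons]
      refine ih _ (fun c' => ?_) c
      rw [PySem.Dict.getD_insert]
      split
      · rfl
      · exact h c'

lemma init_getD (c : Char) : initCharDict.getD c [] = [] :=
  foldl_insert_nil_getD _ _ (fun c' => PySem.Dict.getD_empty c' []) c

lemma build_getD (user_address : String) (c : Char) :
    (buildCharPositions user_address).getD c [] = posOf user_address c := by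
  unfold buildCharPositions posOf
  rw [PySem.Dict.getD_foldl_modify_append, init_getD]
  rfl

lemma zipIdx_snd_lt {α : Type} (l : List α) (k : Nat) :
    (l.zipIdx k).Pairwise (fun p q => p.2 < q.2) := by
  induction l generalizing k with
  | nil => simp
  | cons x t ih =>
      rw [List.zipIdx_cons]
      refine List.Pairwise.cons ?_ (ih (k + 1))
      intro p hp
      have := List.mem_zipIdx hp
      omega

lemma posOf_sorted (user_address : String) (c : Char) :
    (posOf user_address c).Pairwise (· < ·) := by
  unfold posOf
  rw [List.pairwise_map]
  refine List.Pairwise.sublist List.filter_sublist ?_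
  rw [List.pairwise_map]
  refine List.Pairwise.imp ?_ (zipIdx_snd_lt _ 0)
  intro a b h
  simpa using h

lemma build_nodup (user_address : String) : (buildCharPositions user_address).keys.Nodup := by
  unfold buildCharPositions
  refine PySem.Dict.nodup_keys_foldl_modify_key _ Prod.fst [] (fun _ p => (fun l => l ++ [p.2])) _ ?_
  unfold initCharDict
  exact PySem.Dict.nodup_keys_foldl_insert_key _ (fun i : Int => Char.ofNat i.toNat)
    (fun _ _ => []) _ PySem.Dict.nodup_keys_empty

lemma mid_getD (d : PySem.Dict Char (List Int)) (hnd : d.keys.Nodup) (c : Char)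
    (h : d.getD c [] ≠ []) :
    (midDict d).getD c [] = genMidpoints (d.getD c []) := by
  unfold midDict
  have hkeys : (List.map Prod.fst d.items).Nodup := hnd
  have hitems := PySem.Dict.items_foldl_insert_fresh d.items Prod.fst
      (fun p => genMidpoints p.2) PySem.Dict.empty
      (by intro a _; exact PySem.Dict.contains_empty a.1) hkeys
  obtain ⟨v, hv⟩ : ∃ v, d.get? c = some v := by
    cases hg : d.get? c with
    | none => exact absurd (PySem.Dict.getD_of_get?_eq_none d [] hg) h
    | some v => exact ⟨v, rfl⟩
  have hvD : d.getD c [] = v := PySem.Dict.getD_of_get?_eq_some d [] hv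
  have hmem : (c, v) ∈ d.items := (PySem.Dict.get?_eq_some_iff_mem_items d c v hnd).mp hv
  have hmem2 : (c, genMidpoints v) ∈
      (d.items.foldl (fun d p => d.insert p.1 (genMidpoints p.2)) PySem.Dict.empty).items := by
    rw [hitems]
    simp only [PySem.Dict.empty, List.nil_append, List.mem_map]
    exact ⟨(c, v), hmem, rfl⟩
  have hnd2 : (d.items.foldl (fun d p => d.insert p.1 (genMidpoints p.2)) PySem.Dict.empty).keys.Nodup := by
    show (List.map Prod.fst _).Nodup
    rw [hitems]
    simpa using hkeys
  rw [PySem.Dict.getD_of_mem_items _ hmem2 hnd2, hvD]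

lemma genMid_length (ps : List Int) : (genMidpoints ps).length = ps.length - 1 := by
  unfold genMidpoints
  rw [PySem.List.pyRange_of_pos 1 (ps.length : Int) (by norm_num)]
  simp only [List.length_map, List.length_range]
  split <;> omega

lemma genMid_get (ps : List Int) (j : Nat) (h : j + 1 < ps.length) :
    (genMidpoints ps)[j]'(by rw [genMid_length]; omega)
      = PySem.Int.floordiv (ps[j + 1] + ps[j]) 2 := by
  unfold genMidpoints
  have he := PySem.List.pyRange_of_pos 1 (ps.length : Int) (s := 1) (by norm_num)
  rw [List.getElem_map, List.getElem_of_eq he, List.getElem_map, List.getElem_range]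
  have h1 : PySem.List.pyGetD ps (1 + 1 * (j : Int)) 0 = ps[j + 1] := by
    rw [PySem.List.pyGetD_eq_getElem ps 0 (by omega) (by omega)]
    congr 1
    omega
  have h0 : PySem.List.pyGetD ps (1 + 1 * (j : Int) - 1) 0 = ps[j] := by
    rw [PySem.List.pyGetD_eq_getElem ps 0 (by omega) (by omega)]
    congr 1
    omega
  rw [h1, h0]

lemma floordiv2_bounds (a : Int) :
    2 * PySem.Int.floordiv a 2 ≤ a ∧ a < 2 * PySem.Int.floordiv a 2 + 2 := by
  have h := PySem.Int.floordiv_mul_add_mod a 2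
  have h1 := PySem.Int.mod_nonneg a (b := 2) (by norm_num)
  have h2 := PySem.Int.mod_lt a (b := 2) (by norm_num)
  omega

lemma genMid_sorted (ps : List Int) (hs : ps.Pairwise (· < ·)) :
    (genMidpoints ps).Pairwise (· ≤ ·) := by
  rw [List.pairwise_iff_getElem]
  intro a b ha hb hab
  have hl := genMid_length ps
  rw [genMid_get ps a (by omega), genMid_get ps b (by omega)]
  have hmono := List.pairwise_iff_getElem.mp hs
  have h1 : ps[a] < ps[b] := hmono a b (by omega) (by omega) (by omega)
  have h2 : ps[a + 1] ≤ ps[b + 1] :=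
    le_of_lt (hmono (a + 1) (b + 1) (by omega) (by omega) (by omega))
  have ba := floordiv2_bounds (ps[a + 1] + ps[a])
  have bb := floordiv2_bounds (ps[b + 1] + ps[b])
  omega

lemma genMid_getD (ps : List Int) (j : Nat) (h : j + 1 < ps.length) :
    (genMidpoints ps).getD j 0
      = PySem.Int.floordiv (ps.getD (j + 1) 0 + ps.getD j 0) 2 := by
  rw [List.getD_eq_getElem _ _ (by rw [genMid_length]; omega),
      List.getD_eq_getElem _ _ (by omega), List.getD_eq_getElem _ _ (by omega)]
  exact genMid_get ps j h

-- A's bisect-over-midpoints lookup returns exactly B's minimum distance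
lemma bisect_min (i q : Int) (rest : List Int)
    (hs : (q :: rest).Pairwise (· < ·)) :
    |i - PySem.List.pyGetD (q :: rest)
        ((PySem.List.bisectLeft (genMidpoints (q :: rest)) i : Nat) : Int) 0|
      = rest.foldl (fun m r => min m |i - r|) |i - q| := by
  set ps := q :: rest with hps
  have hn : ps.length = rest.length + 1 := by simp [hps]
  have hml := genMid_length ps
  have hms := genMid_sorted ps hs
  obtain ⟨hk_le, hlt, hge⟩ := PySem.List.bisectLeft_spec (genMidpoints ps) i hms
  set k := PySem.List.bisectLeft (genMidpoints ps) i with hk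
  have hkn : k < ps.length := by omega
  have hA : PySem.List.pyGetD ps ((k : Nat) : Int) 0 = ps.getD k 0 := by
    rw [PySem.List.pyGetD_of_nonneg ps 0 (by omega)]
    simp
  have hmono : ∀ a b : Nat, a < b → b < ps.length → ps.getD a 0 < ps.getD b 0 := by
    intro a b hab hb
    rw [List.getD_eq_getElem _ _ (by omega), List.getD_eq_getElem _ _ (by omega)]
    exact (List.pairwise_iff_getElem.mp hs) a b (by omega) (by omega) hab
  have hlt' : ∀ j : Nat, j < k →
      PySem.Int.floordiv (ps.getD (j + 1) 0 + ps.getD j 0) 2 < i := by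
    intro j hj
    rw [← genMid_getD ps j (by omega), List.getD_eq_getElem _ _ (by rw [genMid_length]; omega)]
    exact hlt j (by rw [genMid_length]; omega) hj
  have hge' : ∀ j : Nat, k ≤ j → j < ps.length - 1 →
      i ≤ PySem.Int.floordiv (ps.getD (j + 1) 0 + ps.getD j 0) 2 := by
    intro j h1 h2
    rw [← genMid_getD ps j (by omega)]
    rw [List.getD_eq_getElem _ _ (by rw [genMid_length]; omega)]
    exact hge j (by rw [genMid_length]; omega) h1
  have hmin : ∀ j : Nat, j < ps.length → |i - ps.getD k 0| ≤ |i - ps.getD j 0| := by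
    intro j hj
    rcases lt_trichotomy j k with hjk | hjk | hjk
    · have hk1 : 1 ≤ k := by omega
      have h1 := hlt' (k - 1) (by omega)
      have hb := floordiv2_bounds (ps.getD (k - 1 + 1) 0 + ps.getD (k - 1) 0)
      have hkk : k - 1 + 1 = k := by omega
      rw [hkk] at h1 hb
      have hlt2 : ps.getD (k - 1) 0 < ps.getD k 0 := hmono (k - 1) k (by omega) (by omega)
      have hjk1 : ps.getD j 0 ≤ ps.getD (k - 1) 0 := by
        rcases Nat.eq_or_lt_of_le (by omega : j ≤ k - 1) with h | h
        · rw [h]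
        · exact le_of_lt (hmono j (k - 1) h (by omega))
      exact le_trans (abs_le.mpr ⟨by omega, by omega⟩) (le_abs_self _)
    · rw [hjk]
    · have hkn1 : k < ps.length - 1 := by omega
      have h1 := hge' k (le_refl k) hkn1
      have hb := floordiv2_bounds (ps.getD (k + 1) 0 + ps.getD k 0)
      have hlt2 : ps.getD k 0 < ps.getD (k + 1) 0 := hmono k (k + 1) (by omega) (by omega)
      have hjk1 : ps.getD (k + 1) 0 ≤ ps.getD j 0 := by
        rcases Nat.eq_or_lt_of_le (by omega : k + 1 ≤ j) with h | h
        · rw [h]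
        · exact le_of_lt (hmono (k + 1) j h (by omega))
      exact le_trans
        (show |i - ps.getD k 0| ≤ ps.getD j 0 - i from abs_le.mpr ⟨by omega, by omega⟩)
        (by rw [abs_sub_comm]; exact le_abs_self _)
  rw [hA]
  rw [show rest.foldl (fun m r => min m |i - r|) |i - q|
      = (rest.map (fun r => |i - r|)).foldl min |i - q| from List.foldl_map.symm]
  have h1 := PySem.List.foldl_min_le (rest.map fun r => |i - r|) |i - q|
  have h2 := PySem.List.foldl_min_mem (rest.map fun r => |i - r|) |i - q|
  have hq : ps.getD 0 0 = q := rfl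
  apply le_antisymm
  · rcases h2 with h2 | h2
    · rw [h2]
      have := hmin 0 (by omega)
      rwa [hq] at this
    · rw [List.mem_map] at h2
      obtain ⟨r, hr, hrv⟩ := h2
      rw [List.mem_iff_getElem] at hr
      obtain ⟨j, hj, rfl⟩ := hr
      rw [← hrv]
      have he : rest[j] = ps.getD (j + 1) 0 := by
        rw [show ps.getD (j + 1) 0 = rest.getD j 0 from rfl, List.getD_eq_getElem _ _ hj]
      rw [he]
      exact hmin (j + 1) (by omega)
  · rcases Nat.eq_zero_or_pos k with hk0 | hk0
    · rw [hk0, hq]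
      exact h1.1
    · refine h1.2 _ ?_
      rw [List.mem_map]
      refine ⟨rest[k - 1]'(by omega), List.getElem_mem _, ?_⟩
      have he : rest[k - 1]'(by omega) = ps.getD k 0 := by
        rw [show ps.getD k 0 = rest.getD (k - 1) 0 by rw [show k = k - 1 + 1 by omega]; rfl,
            List.getD_eq_getElem _ _ (by omega)]
      rw [he]

lemma calc_eq (user_address address : String) :
    calcError (buildCharPositions user_address) (midDict (buildCharPositions user_address)) address
      = calcErrorAlt (buildCharPositions user_address) address := by
  unfold calcError calcErrorAlt
  refine PySem.List.foldl_congr_mem _ _ _ _ ?_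
  intro acc p _
  cases hps : (buildCharPositions user_address).getD p.1 [] with
  | nil => simp
  | cons q rest =>
    have hsort : (q :: rest).Pairwise (· < ·) := by
      have h := posOf_sorted user_address p.1
      rw [← build_getD, hps] at h
      exact h
    have hmd : (midDict (buildCharPositions user_address)).getD p.1 [] = genMidpoints (q :: rest) := by
      rw [mid_getD _ (build_nodup user_address) _ (by rw [hps]; simp), hps]
    cases rest with
    | nil =>
        have hgm : genMidpoints [q] = [] := rfl
        simp [hmd, hgm, PySem.List.pyGetD]
    | cons q1 r2 =>
        have hne : genMidpoints (q :: q1 :: r2) ≠ [] := by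
          intro h
          have hl := genMid_length (q :: q1 :: r2)
          rw [h] at hl
          simp at hl
        simp only [hmd, ne_eq, reduceCtorEq, not_false_eq_true, hne, if_pos]
        exact congrArg _ (bisect_min (p.2 : Int) q (q1 :: r2) hsort)

-- ===== VERDICT (by name: the statement is the Claim_ definition above) =====
theorem calculate_error_function_spec : Claim_equal_calculate_error_function := by
  intro ua pas _ _
  unfold Spec_calculate_error_function calculate_error_function calculate_error_function_alt
  exact List.map_congr_left (fun a _ => calc_eq ua a)
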